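-- pv_equiv track=rewrite | github.com/cyan-wolf/competitive_programming | matcomgrader/icpc_caribbean_qualifiers_2022/warmup_1/h.py | det_honi_blocks
-- ===== SOURCE A (Python) =====
-- def det_honi_blocks(word):
--     honi = "HONI"
--     looking_for = 0
--     block_amt = 0
--
--     for c in word:
--         if c == honi[looking_for]:
--             if looking_for == len(honi) - 1:
--                 block_amt += 1
--
--             looking_for = (looking_for + 1) % len(honi)
--
--     return block_amt
-- ===== SOURCE B (Python) =====
-- def det_honi_blocks(word):
--     # Block-at-a-time: consume one full "HONI" subsequence per loop iteration
--     # from a shared iterator; `ch in it` advances past the first occurrence.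
--     it = iter(word)
--     blocks = 0
--     while all(ch in it for ch in "HONI"):
--         blocks += 1
--     return blocks
-- ===== Notes on version B (the rewrite author's own statement) =====
-- stated objective: idiomatic
-- what changed: Replaced the per-character automaton (cyclic pointer + mismatch branch) with a block-at-a-time loop that consumes one whole HONI subsequence per iteration from a shared iterator via the idiomatic `ch in it` membership trick.
import Mathlib
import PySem

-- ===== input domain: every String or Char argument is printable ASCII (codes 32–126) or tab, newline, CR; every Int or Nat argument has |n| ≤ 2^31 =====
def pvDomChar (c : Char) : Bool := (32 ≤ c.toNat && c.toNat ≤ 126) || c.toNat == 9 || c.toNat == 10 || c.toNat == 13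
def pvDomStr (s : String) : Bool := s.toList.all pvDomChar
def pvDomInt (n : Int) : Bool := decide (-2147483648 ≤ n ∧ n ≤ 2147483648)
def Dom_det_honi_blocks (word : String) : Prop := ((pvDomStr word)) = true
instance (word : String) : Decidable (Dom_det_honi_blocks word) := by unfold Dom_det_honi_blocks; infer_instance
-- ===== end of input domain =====

-- B counts one whole "HONI" subsequence block per loop iteration, consuming a shared
-- iterator with `ch in it`, instead of A's per-character cyclic automaton; objective: idiomatic.


-- ===== PORT A =====
-- honi = "HONI"; honi[i] for i ∈ {0..3} is honiA.getD i (default unreachable)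
def honiA : List Char := ['H', 'O', 'N', 'I']

-- for c in word: if c == honi[looking_for]: (maybe bump block_amt); advance looking_for
def det_honi_blocks (word : String) : Int :=
  (word.toList.foldl
    (fun (s : Nat × Int) c =>
      if c == honiA.getD s.1 'H' then
        ((s.1 + 1) % honiA.length, if s.1 == honiA.length - 1 then s.2 + 1 else s.2)
      else s)
    (0, 0)).2

-- ===== PORT B =====
-- the iterator is the remaining suffix of the word's characters.
-- `ch in it`: advance the iterator past the first occurrence of ch (none = exhausted)
def seekB (l : List Char) (ch : Char) : Option (List Char) :=
  match l with
  | [] => none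
  | x :: xs => if x == ch then some xs else seekB xs ch

-- all(ch in it for ch in cs): consume each required char in turn (short-circuits on none)
def consumeB (l : List Char) (cs : List Char) : Option (List Char) :=
  match cs with
  | [] => some l
  | c :: cs' =>
      match seekB l c with
      | none => none
      | some m => consumeB m cs'

def honiB : List Char := ['H', 'O', 'N', 'I']

theorem seekB_len {l : List Char} {ch : Char} {r : List Char} (h : seekB l ch = some r) :
    r.length + 1 ≤ l.length := by
  induction l with
  | nil => simp [seekB] at h
  | cons x xs ih =>
      simp only [seekB] at h
      split at h
      · cases h; simp
      · have := ih h; simp; omega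

theorem consumeB_len {l cs r : List Char} (h : consumeB l cs = some r) :
    r.length + cs.length ≤ l.length := by
  induction cs generalizing l with
  | nil => simp [consumeB] at h; simp [h]
  | cons c cs' ih =>
      simp only [consumeB] at h
      cases hs : seekB l c with
      | none => rw [hs] at h; cases h
      | some m =>
          rw [hs] at h
          have h1 := seekB_len hs
          have h2 := ih h
          simp; omega

-- while all(ch in it for ch in "HONI"): blocks += 1
def bblocks (l : List Char) : Int :=
  match h : consumeB l honiB with
  | none => 0
  | some r => 1 + bblocks r
termination_by l.length
decreasing_by
  have := consumeB_len h
  simp [honiB] at this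
  omega

def det_honi_blocks_alt (word : String) : Int := bblocks word.toList

-- ===== PRECONDITION & SPEC =====
def Spec_det_honi_blocks (word : String) (out : Int) : Prop := out = det_honi_blocks_alt word
instance (word : String) (out : Int) : Decidable (Spec_det_honi_blocks word out) := by unfold Spec_det_honi_blocks; infer_instance

-- ===== CLAIM (what is proved, stated in full; the proofs are below) =====
def Claim_equal_det_honi_blocks : Prop := ∀ (word : String), Dom_det_honi_blocks word → Spec_det_honi_blocks word (det_honi_blocks word)

-- ===== LEMMAS AND PROOFS =====

-- A's fold step, named
def astep (s : Nat × Int) (c : Char) : Nat × Int :=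
  if c == honiA.getD s.1 'H' then
    ((s.1 + 1) % honiA.length, if s.1 == honiA.length - 1 then s.2 + 1 else s.2)
  else s

-- B's remaining-block value from automaton state lf
def gB (l : List Char) (lf : Nat) : Int :=
  match consumeB l (honiB.drop lf) with
  | none => 0
  | some r => 1 + bblocks r

theorem bblocks_eq (l : List Char) :
    bblocks l = match consumeB l honiB with
      | none => 0
      | some r => 1 + bblocks r := by
  rw [bblocks]
  cases h : consumeB l honiB <;> rfl

theorem gB_zero (l : List Char) : gB l 0 = bblocks l := by
  rw [gB, List.drop_zero, bblocks_eq]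

theorem consumeB_cons_miss (x : Char) (xs cs : List Char) (c : Char)
    (hc : ¬ (x == c)) (hcs : cs ≠ []) (hhead : cs.headI = c) :
    consumeB (x :: xs) cs = consumeB xs cs := by
  cases cs with
  | nil => simp at hcs
  | cons c' cs' =>
      simp only [List.headI] at hhead
      subst hhead
      simp only [consumeB, seekB, if_neg hc]

theorem main_inv (l : List Char) (lf : Nat) (acc : Int) (hlf : lf < 4) :
    (l.foldl astep (lf, acc)).2 = acc + gB l lf := by
  induction l generalizing lf acc with
  | nil =>
      interval_cases lf <;> simp [gB, honiB, consumeB, seekB]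
  | cons x xs ih =>
      by_cases hc : (x == honiA.getD lf 'H')
      · have hx : x = honiA.getD lf 'H' := by simpa using hc
        simp only [List.foldl_cons, astep, hc, if_true]
        by_cases h3 : lf = 3
        · subst h3
          simp only [honiA] at hx ⊢
          norm_num
          rw [ih 0 (acc + 1) (by omega)]
          have : gB (x :: xs) 3 = 1 + bblocks xs := by
            simp [gB, honiB, List.drop, consumeB, seekB, hx]
          rw [gB_zero, this]
          ring
        · have hlf3 : lf < 3 := by omega
          have hmod : (lf + 1) % honiA.length = lf + 1 := by
            simp [honiA]; omega
          have hne : (lf == honiA.length - 1) = false := by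
            simp [honiA]; omega
          rw [hmod, hne]
          simp only [if_false, Bool.false_eq_true]
          rw [ih (lf + 1) acc (by omega)]
          congr 1
          -- gB (x::xs) lf = gB xs (lf+1) when x is the sought char
          interval_cases lf <;>
            simp_all [gB, honiA, honiB, consumeB, seekB]
      · simp only [List.foldl_cons, astep, hc, if_false, Bool.false_eq_true]
        rw [ih lf acc hlf]
        congr 1
        have hdrop_ne : honiB.drop lf ≠ [] := by
          interval_cases lf <;> simp [honiB]
        have hhead : (honiB.drop lf).headI = honiA.getD lf 'H' := by
          interval_cases lf <;> simp [honiB, honiA]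
        unfold gB
        rw [consumeB_cons_miss x xs (honiB.drop lf) (honiA.getD lf 'H') hc hdrop_ne hhead]

-- ===== VERDICT (by name: the statement is the Claim_ definition above) =====
theorem det_honi_blocks_spec : Claim_equal_det_honi_blocks := by
  intro word _
  show det_honi_blocks word = det_honi_blocks_alt word
  unfold det_honi_blocks det_honi_blocks_alt
  rw [show (fun (s : Nat × Int) c =>
      if c == honiA.getD s.1 'H' then
        ((s.1 + 1) % honiA.length, if s.1 == honiA.length - 1 then s.2 + 1 else s.2)
      else s) = astep from rfl]
  rw [main_inv word.toList 0 0 (by omega), gB_zero]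
  ring
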